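-- pv_equiv track=rewrite | github.com/posl/comment_recommendation | script/split_gen/1_time/en/192_B/1.py | is_hard_to_read
-- ===== SOURCE A (Python) =====
-- def is_hard_to_read(s):
--     for i in range(len(s)):
--         if i % 2 == 0:
--             if not s[i].isupper():
--                 return False
--         else:
--             if not s[i].islower():
--                 return False
--     return True
-- ===== SOURCE B (Python) =====
-- def is_hard_to_read(s):
--     return all(c.isupper() for c in s[::2]) and all(c.islower() for c in s[1::2])
-- ===== Notes on version B (the rewrite author's own statement) =====
-- stated objective: idiomatic
-- what changed: Replaced the index-parity loop with early returns by two stride-2 slices (s[::2], s[1::2]) checked with all() generators.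
import Mathlib
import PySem

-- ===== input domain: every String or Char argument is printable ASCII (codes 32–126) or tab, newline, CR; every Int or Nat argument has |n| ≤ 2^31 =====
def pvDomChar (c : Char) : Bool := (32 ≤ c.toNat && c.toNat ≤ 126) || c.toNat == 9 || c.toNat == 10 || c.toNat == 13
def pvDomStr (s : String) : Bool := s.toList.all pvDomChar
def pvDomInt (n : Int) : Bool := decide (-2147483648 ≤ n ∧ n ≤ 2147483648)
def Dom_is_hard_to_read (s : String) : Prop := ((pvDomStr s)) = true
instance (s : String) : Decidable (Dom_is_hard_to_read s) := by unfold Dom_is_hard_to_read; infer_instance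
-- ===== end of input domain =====

-- B checks the even- and odd-indexed stride-2 slices in two separate passes instead of A's single index-parity loop (idiomatic decomposition, same cost).


-- ===== PORT A =====
-- A's for-loop over range(len(s)) with early returns: index-carrying recursion over the characters.
def isHardGoA (i : Nat) (cs : List Char) : Bool :=
  match cs with
  | [] => true
  | c :: rest =>
    if i % 2 == 0 then
      if !(PySem.Chars.isupper c) then false else isHardGoA (i + 1) rest
    else
      if !(PySem.Chars.islower c) then false else isHardGoA (i + 1) rest

def is_hard_to_read (s : String) : Bool := isHardGoA 0 s.toList

-- ===== PORT B =====
-- all(c.isupper() for c in s[::2]) and all(c.islower() for c in s[1::2])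
def is_hard_to_read_alt (s : String) : Bool :=
  (match PySem.List.slice? s.toList none none 2 with
   | some ev => ev.all PySem.Chars.isupper
   | none => false)   -- unreachable: step = 2 ≠ 0
  &&
  (match PySem.List.slice? s.toList (some 1) none 2 with
   | some od => od.all PySem.Chars.islower
   | none => false)   -- unreachable: step = 2 ≠ 0

-- ===== PRECONDITION & SPEC =====
def Spec_is_hard_to_read (s : String) (out : Bool) : Prop := out = is_hard_to_read_alt s
instance (s : String) (out : Bool) : Decidable (Spec_is_hard_to_read s out) := by unfold Spec_is_hard_to_read; infer_instance

-- ===== CLAIM (what is proved, stated in full; the proofs are below) =====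
def Claim_equal_is_hard_to_read : Prop := ∀ (s : String), Dom_is_hard_to_read s → Spec_is_hard_to_read s (is_hard_to_read s)

-- ===== LEMMAS AND PROOFS =====

-- every other element, starting with the first
def everyOther {α : Type} : List α → List α
  | [] => []
  | [a] => [a]
  | a :: _ :: rest => a :: everyOther rest

theorem filterMap_two_stride {α : Type} : ∀ (n : Nat) (xs : List α),
    List.filterMap (fun k => xs[2 * k]?) (List.range n) = everyOther (xs.take (2 * n)) := by
  intro n
  induction n with
  | zero => intro xs; simp [everyOther]
  | succ m ih =>
    intro xs
    rw [List.range_succ_eq_map]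
    match xs with
    | [] => simp [everyOther]
    | [a] =>
      simp only [List.filterMap_cons, List.filterMap_map]
      have h1 : ∀ k : Nat, ([a] : List α)[2 * (k + 1)]? = none := by
        intro k; apply List.getElem?_eq_none; simp; omega
      simp [List.take_of_length_le, show (2 * (m + 1)) ≥ 1 by omega, everyOther]
    | a :: b :: rest =>
      simp only [List.filterMap_cons, List.filterMap_map]
      have h0 : (a :: b :: rest)[2 * 0]? = some a := rfl
      have h1 : (fun k => (a :: b :: rest)[2 * Nat.succ k]?) = (fun k => rest[2 * k]?) := by
        funext k
        have : 2 * Nat.succ k = 2 * k + 1 + 1 := by omega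
        rw [this]
        simp
      simp only [h0, Function.comp_def, Nat.succ_eq_add_one]
      have h1' : (fun k => (a :: b :: rest)[2 * (k + 1)]?) = (fun k => rest[2 * k]?) := h1
      rw [h1', ih rest]
      have : 2 * (m + 1) = 2 * m + 1 + 1 := by omega
      rw [this]
      simp [everyOther]

theorem slice?_step_two {α : Type} (xs : List α) :
    PySem.List.slice? xs none none 2 = some (everyOther xs) := by
  simp only [PySem.List.slice?, PySem.List.sliceIndices]
  norm_num
  have hc : (if 0 < xs.length then (((xs.length : Int) + 2 - 1) / 2).toNat else 0)
      = (xs.length + 1) / 2 := by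
    split <;> omega
  rw [hc]
  have hf : (fun k : Nat => xs[((2 : Int) * ↑k).toNat]?) = (fun k => xs[2 * k]?) := by
    funext k
    have h2 : ((2 : Int) * ↑k).toNat = 2 * k := by omega
    rw [h2]
  rw [hf, filterMap_two_stride]
  congr 1
  rw [List.take_of_length_le (by omega)]

theorem slice?_one_step_two {α : Type} (xs : List α) :
    PySem.List.slice? xs (some 1) none 2 = some (everyOther xs.tail) := by
  simp only [PySem.List.slice?, PySem.List.sliceIndices]
  norm_num
  match xs with
  | [] => simp [everyOther]
  | x :: t =>
    have hmin : min (1 : Int) ↑(x :: t).length = 1 := by simp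
    rw [hmin]
    have hc : (if 1 < (x :: t).length then ((((x :: t).length : Int) - 1 + 2 - 1) / 2).toNat else 0)
        = (t.length + 1) / 2 := by
      simp only [List.length_cons]
      split <;> omega
    rw [hc]
    have hf : (fun k : Nat => (x :: t)[((1 : Int) + 2 * ↑k).toNat]?) = (fun k => t[2 * k]?) := by
      funext k
      have hn : ((1 : Int) + 2 * ↑k).toNat = 2 * k + 1 := by omega
      rw [hn]
      simp
    rw [hf, filterMap_two_stride]
    simp only [List.tail_cons]
    congr 1
    rw [List.take_of_length_le (by omega)]

theorem everyOther_cons_tail {α : Type} (b : α) (rest : List α) :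
    everyOther (b :: rest) = b :: everyOther rest.tail := by
  cases rest <;> simp [everyOther]

theorem isHardGoA_shift : ∀ (cs : List Char) (i : Nat), isHardGoA (i + 2) cs = isHardGoA i cs := by
  intro cs
  induction cs with
  | nil => intro i; rfl
  | cons c rest ih =>
    intro i
    simp only [isHardGoA]
    have : (i + 2) % 2 = i % 2 := by omega
    rw [this]
    rw [show i + 2 + 1 = (i + 1) + 2 by omega, ih (i + 1)]

theorem isHardGoA_zero : ∀ (cs : List Char),
    isHardGoA 0 cs = ((everyOther cs).all PySem.Chars.isupper && (everyOther cs.tail).all PySem.Chars.islower) := by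
  intro cs
  induction cs using everyOther.induct with
  | case1 => rfl
  | case2 a =>
    simp [isHardGoA, everyOther]
  | case3 a b rest ih =>
    simp only [isHardGoA, everyOther, List.tail_cons, everyOther_cons_tail]
    rw [show (0 : Nat) + 1 + 1 = 0 + 2 by omega, isHardGoA_shift, ih]
    simp only [List.all_cons]
    cases PySem.Chars.isupper a <;> cases PySem.Chars.islower b <;>
      simp

-- ===== VERDICT (by name: the statement is the Claim_ definition above) =====
theorem is_hard_to_read_spec : Claim_equal_is_hard_to_read := by
  intro s _
  unfold Spec_is_hard_to_read is_hard_to_read is_hard_to_read_alt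
  rw [slice?_step_two, slice?_one_step_two, isHardGoA_zero]
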